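-- pv_equiv track=rewrite | github.com/dlebed/secure-constants | bounds_calculator.py | plotkin_bound
-- ===== SOURCE A (Python) =====
-- def plotkin_bound(n: int, M: int) -> int:
--     """Plotkin bound (inverse calculation)"""
--     if M <= 1:
--         return n
--     for d in range(n, 0, -1):
--         if 2 * d > n:
--             if d % 2 == 0:
--                 max_M = (2 * d) // (2 * d - n) if 2 * d != n else 4 * d
--             else:
--                 max_M = (2 * d + 1) // (2 * d + 1 - n) if 2 * d + 1 != n else 4 * d + 2
--         else:
--             max_M = 2 ** (n - 2 * (d // 2) + 1)
--         if max_M >= M: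
--             return d
--     return 1
-- ===== SOURCE B (Python) =====
-- def _supports(n, d, M):
--     """True iff the Plotkin bound allows at least M codewords at distance d
--     (compares the power-of-two case via bit_length instead of building 2**e)."""
--     if 2 * d <= n:
--         return n - 2 * (d // 2) + 1 >= (M - 1).bit_length()
--     num = 2 * d if d % 2 == 0 else 2 * d + 1
--     return num // (num - n) >= M
--
--
-- def plotkin_bound(n, M):
--     """Plotkin bound (inverse calculation)"""
--     if M <= 1:
--         return n
--     lo, hi, best = 1, n, 1
--     while lo <= hi:
--         mid = (lo + hi) // 2
--         if _supports(n, mid, M):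
--             best, lo = mid, mid + 1
--         else:
--             hi = mid - 1
--     return best
-- ===== Notes on version B (the rewrite author's own statement) =====
-- stated objective: faster
-- what changed: Replaces A's linear descending scan over d with a binary search for the largest admissible d, exploiting that the allowed codebook size is nonincreasing in d, and compares the power-of-two branch via bit_length instead of materializing 2**e.
import Mathlib
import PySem

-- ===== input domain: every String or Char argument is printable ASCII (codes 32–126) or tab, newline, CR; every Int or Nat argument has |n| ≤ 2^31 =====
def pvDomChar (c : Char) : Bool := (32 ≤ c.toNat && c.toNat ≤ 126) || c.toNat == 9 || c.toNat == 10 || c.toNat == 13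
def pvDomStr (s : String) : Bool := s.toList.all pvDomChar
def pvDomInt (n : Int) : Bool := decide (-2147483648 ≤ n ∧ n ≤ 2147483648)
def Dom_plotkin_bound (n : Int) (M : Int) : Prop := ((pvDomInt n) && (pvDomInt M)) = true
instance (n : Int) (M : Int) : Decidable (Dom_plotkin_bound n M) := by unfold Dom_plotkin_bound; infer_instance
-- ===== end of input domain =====

-- B replaces A's linear descending scan over d by a binary search for the largest
-- admissible d (the bound is nonincreasing in d), comparing the power-of-two branch
-- via bit_length instead of materializing 2**e.

-- ===== PORT A =====
-- max_M as computed in the body of A's loop; Python's `2 ** e` is ported as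
-- `(2:Int) ^ e.toNat`, exact here since on every reachable call (1 ≤ d, 2*d ≤ n)
-- the exponent is ≥ 1.
def pvMaxMA (n d : Int) : Int :=
  if 2 * d > n then
    if PySem.Int.mod d 2 = 0 then
      (if 2 * d ≠ n then PySem.Int.floordiv (2 * d) (2 * d - n) else 4 * d)
    else
      (if 2 * d + 1 ≠ n then PySem.Int.floordiv (2 * d + 1) (2 * d + 1 - n) else 4 * d + 2)
  else
    (2 : Int) ^ (n - 2 * (PySem.Int.floordiv d 2) + 1).toNat

-- A's `for d in range(n, 0, -1): … if max_M >= M: return d` / fallthrough `return 1`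
def pvLoopA (n M : Int) : List Int → Int
  | [] => 1
  | d :: rest => if pvMaxMA n d ≥ M then d else pvLoopA n M rest

def plotkin_bound (n : Int) (M : Int) : Int :=
  if M ≤ 1 then n
  else pvLoopA n M (PySem.List.pyRange n 0 (-1))

-- ===== PORT B =====
-- Source B's `_supports(n, d, M)`
def pvSupports (n d M : Int) : Bool :=
  if 2 * d ≤ n then
    decide ((PySem.Int.bitLength (M - 1) : Int) ≤ n - 2 * (PySem.Int.floordiv d 2) + 1)
  else
    let num := if PySem.Int.mod d 2 = 0 then 2 * d else 2 * d + 1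
    decide (M ≤ PySem.Int.floordiv num (num - n))

-- Source B's binary-search `while lo <= hi` loop
def pvSearch (n M lo hi best : Int) : Int :=
  if _h : lo ≤ hi then
    let mid := PySem.Int.floordiv (lo + hi) 2
    if pvSupports n mid M then pvSearch n M (mid + 1) hi mid
    else pvSearch n M lo (mid - 1) best
  else best
termination_by (hi + 1 - lo).toNat
decreasing_by
  · have := PySem.Int.floordiv_two_mid_bounds _h
    omega
  · have := PySem.Int.floordiv_two_mid_bounds _h
    omega

def plotkin_bound_alt (n : Int) (M : Int) : Int :=
  if M ≤ 1 then n
  else pvSearch n M 1 n 1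

-- ===== PRECONDITION & SPEC =====
def Spec_plotkin_bound (n : Int) (M : Int) (out : Int) : Prop := out = plotkin_bound_alt n M
instance (n : Int) (M : Int) (out : Int) : Decidable (Spec_plotkin_bound n M out) := by unfold Spec_plotkin_bound; infer_instance

-- ===== CLAIM (what is proved, stated in full; the proofs are below) =====
def Claim_equal_plotkin_bound : Prop := ∀ (n : Int) (M : Int), Dom_plotkin_bound n M → Spec_plotkin_bound n M (plotkin_bound n M)

-- ===== LEMMAS AND PROOFS =====

-- Normal form of A's max_M: the `else 4*d` / `else 4*d+2` arms are dead inside `2*d > n`.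
theorem pvMaxMA_eq (n d : Int) :
    pvMaxMA n d =
      if 2 * d > n then
        (if d % 2 = 0 then (2 * d) / (2 * d - n) else (2 * d + 1) / (2 * d + 1 - n))
      else (2 : Int) ^ (n - 2 * (d / 2) + 1).toNat := by
  unfold pvMaxMA
  rw [PySem.Int.mod_eq_emod_of_pos (a := d) (by norm_num)]
  rw [PySem.Int.floordiv_eq_ediv_of_pos (a := d) (by norm_num)]
  by_cases h : 2 * d > n
  · simp only [if_pos h]
    by_cases hp : d % 2 = 0
    · rw [if_pos hp, if_pos hp, if_pos (by omega)]
      rw [PySem.Int.floordiv_eq_ediv_of_pos (by omega)]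
    · rw [if_neg hp, if_neg hp, if_pos (by omega)]
      rw [PySem.Int.floordiv_eq_ediv_of_pos (by omega)]
  · simp only [if_neg h]

-- M ≤ 2^t  ↔  bitLength (M-1) ≤ t, for M ≥ 2
theorem pvPow_iff (M : Int) (t : Nat) (hM : 2 ≤ M) :
    M ≤ (2 : Int) ^ t ↔ PySem.Int.bitLength (M - 1) ≤ t := by
  have hK : (1 : Int) ≤ M - 1 := by omega
  have hlt := PySem.Int.lt_two_pow_bitLength (M - 1)
  have hle := PySem.Int.two_pow_bitLength_le (M - 1) (by omega)
  have habs : ((M - 1).natAbs : Int) = M - 1 := Int.natAbs_of_nonneg (by omega)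
  constructor
  · intro h
    by_contra hc
    have ht : t ≤ PySem.Int.bitLength (M - 1) - 1 := by omega
    have : (2 : Nat) ^ t ≤ 2 ^ (PySem.Int.bitLength (M - 1) - 1) :=
      Nat.pow_le_pow_right (by norm_num) ht
    have h2 : (2 : Nat) ^ t ≤ (M - 1).natAbs := le_trans this hle
    have h3 : ((2 : Nat) ^ t : Int) ≤ M - 1 := by
      calc ((2 : Nat) ^ t : Int) ≤ ((M - 1).natAbs : Int) := by exact_mod_cast h2
        _ = M - 1 := habs
    have : ((2 : Nat) ^ t : Int) = (2 : Int) ^ t := by push_cast; ring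
    omega
  · intro h
    have : (2 : Nat) ^ PySem.Int.bitLength (M - 1) ≤ 2 ^ t :=
      Nat.pow_le_pow_right (by norm_num) h
    have h2 : (M - 1).natAbs < (2 : Nat) ^ t := lt_of_lt_of_le hlt this
    have h3 : M - 1 < ((2 : Nat) ^ t : Int) := by
      calc M - 1 = ((M - 1).natAbs : Int) := habs.symm
        _ < ((2 : Nat) ^ t : Int) := by exact_mod_cast h2
    have : ((2 : Nat) ^ t : Int) = (2 : Int) ^ t := by push_cast; ring
    omega

-- bitLength (M-1) ≥ 1 for M ≥ 2
theorem pvBitLength_pos (M : Int) (hM : 2 ≤ M) : 1 ≤ PySem.Int.bitLength (M - 1) := by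
  by_contra hc
  have h0 : PySem.Int.bitLength (M - 1) = 0 := by omega
  have := PySem.Int.lt_two_pow_bitLength (M - 1)
  rw [h0] at this
  simp at this
  omega

-- B's _supports decides exactly `max_M(d) ≥ M`
theorem pvSupports_iff (n d M : Int) (hM : 2 ≤ M) :
    pvSupports n d M = true ↔ M ≤ pvMaxMA n d := by
  rw [pvMaxMA_eq]
  unfold pvSupports
  rw [PySem.Int.mod_eq_emod_of_pos (a := d) (by norm_num),
    PySem.Int.floordiv_eq_ediv_of_pos (a := d) (by norm_num)]
  by_cases h : 2 * d ≤ n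
  · rw [if_pos h, if_neg (show ¬ (2 * d > n) by omega), decide_eq_true_eq,
      pvPow_iff M (n - 2 * (d / 2) + 1).toNat hM]
    have hbl := pvBitLength_pos M hM
    omega
  · rw [if_neg h, if_pos (show 2 * d > n by omega)]
    by_cases hp : d % 2 = 0
    · rw [if_pos hp, if_pos hp]
      show decide (M ≤ PySem.Int.floordiv (2 * d) (2 * d - n)) = true ↔ _
      rw [PySem.Int.floordiv_eq_ediv_of_pos (show (0:Int) < 2 * d - n by omega),
        decide_eq_true_eq]
    · rw [if_neg hp, if_neg hp]
      show decide (M ≤ PySem.Int.floordiv (2 * d + 1) (2 * d + 1 - n)) = true ↔ _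
      rw [PySem.Int.floordiv_eq_ediv_of_pos (show (0:Int) < 2 * d + 1 - n by omega),
        decide_eq_true_eq]

-- floor division is monotone along a rational inequality (positive divisors)
theorem pvEdivCross (x y k m : Int) (hk : 0 < k) (hm : 0 < m) (h : y * k ≤ x * m) :
    y / m ≤ x / k := by
  rw [Int.le_ediv_iff_mul_le hk]
  have h1 : (y / m) * m ≤ y := Int.ediv_mul_le y (by omega)
  have h2 : (y / m) * k * m ≤ x * m := by
    calc (y / m) * k * m = (y / m) * m * k := by ring
      _ ≤ y * k := by exact mul_le_mul_of_nonneg_right h1 (by omega)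
      _ ≤ x * m := h
  exact le_of_mul_le_mul_right h2 hm

theorem pvIntLtTwoPow (t : Nat) : (t : Int) < 2 ^ t := by
  have := Nat.lt_two_pow_self (n := t)
  exact_mod_cast this

-- max_M is nonincreasing from d to d+1 on 1 ≤ d, d+1 ≤ n
theorem pvMono_succ (n d : Int) (h1 : 1 ≤ d) (h2 : d + 1 ≤ n) :
    pvMaxMA n (d + 1) ≤ pvMaxMA n d := by
  rw [pvMaxMA_eq, pvMaxMA_eq]
  have hd2 : 0 ≤ d % 2 ∧ d % 2 < 2 := ⟨Int.emod_nonneg d (by norm_num), Int.emod_lt_of_pos d (by norm_num)⟩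
  by_cases hbig : 2 * d > n
  · -- both in the ratio branch
    rw [if_pos hbig, if_pos (by omega)]
    by_cases hp : d % 2 = 0
    · rw [if_pos hp, if_neg (by omega)]
      exact pvEdivCross (2 * d) (2 * (d + 1) + 1) (2 * d - n) (2 * (d + 1) + 1 - n)
        (by omega) (by omega) (by nlinarith)
    · rw [if_neg hp, if_pos (by omega)]
      exact pvEdivCross (2 * d + 1) (2 * (d + 1)) (2 * d + 1 - n) (2 * (d + 1) - n)
        (by omega) (by omega) (by nlinarith)
  · by_cases hbig1 : 2 * (d + 1) > n
    · -- boundary: n = 2d or n = 2d+1; ratio at d+1, power at d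
      rw [if_pos hbig1, if_neg hbig]
      have hn : n = 2 * d ∨ n = 2 * d + 1 := by omega
      have hpowle : ∀ (a : Int) (t : Nat), a ≤ 2 * (t : Int) → a ≤ 2 ^ (t + 1) := by
        intro a t ha
        have := pvIntLtTwoPow t
        calc a ≤ 2 * (t : Int) := ha
          _ ≤ 2 * 2 ^ t := by omega
          _ = 2 ^ (t + 1) := by ring
      by_cases hp : d % 2 = 0
      · rw [if_neg (by omega)]
        have he : n - 2 * (d / 2) + 1 = n - d + 1 := by omega
        rcases hn with hn | hn
        · -- n = 2d, d even: (2d+3)/3 ≤ 2^(d+1)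
          have hv : (2 * (d + 1) + 1) / (2 * (d + 1) + 1 - n) = (2 * d + 3) / 3 := by
            rw [hn]; ring_nf
          rw [hv, he, hn]
          have ht : (2 * d - d + 1).toNat = d.toNat + 1 := by omega
          rw [ht]
          exact hpowle _ d.toNat (by omega)
        · -- n = 2d+1, d even: (2d+3)/2 ≤ 2^(d+2)
          have hv : (2 * (d + 1) + 1) / (2 * (d + 1) + 1 - n) = (2 * d + 3) / 2 := by
            rw [hn]; ring_nf
          rw [hv, he, hn]
          have ht : (2 * d + 1 - d + 1).toNat = d.toNat + 2 := by omega
          rw [ht]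
          have h1' : (2 * d + 3) / 2 ≤ 2 * (d.toNat + 1 : Int) := by omega
          have := hpowle ((2 * d + 3) / 2) (d.toNat + 1) (by omega)
          calc (2 * d + 3) / 2 ≤ 2 ^ (d.toNat + 1 + 1) := this
            _ = 2 ^ (d.toNat + 2) := by ring_nf
      · rw [if_pos (by omega)]
        have he : n - 2 * (d / 2) + 1 = n - d + 2 := by omega
        rcases hn with hn | hn
        · -- n = 2d, d odd: (2d+2)/2 = d+1 ≤ 2^(d+2)
          have hv : (2 * (d + 1)) / (2 * (d + 1) - n) = (2 * d + 2) / 2 := by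
            rw [hn]; ring_nf
          rw [hv, he, hn]
          have ht : (2 * d - d + 2).toNat = d.toNat + 2 := by omega
          rw [ht]
          have := hpowle ((2 * d + 2) / 2) (d.toNat + 1) (by omega)
          calc (2 * d + 2) / 2 ≤ 2 ^ (d.toNat + 1 + 1) := this
            _ = 2 ^ (d.toNat + 2) := by ring_nf
        · -- n = 2d+1, d odd: (2d+2)/1 = 2d+2 ≤ 2^(d+3)
          have hv : (2 * (d + 1)) / (2 * (d + 1) - n) = 2 * d + 2 := by
            rw [hn]; ring_nf; omega
          rw [hv, he, hn]
          have ht : (2 * d + 1 - d + 2).toNat = d.toNat + 3 := by omega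
          rw [ht]
          have h2p := hpowle (2 * d + 2) (d.toNat + 1) (by omega)
          have : (2:Int) ^ (d.toNat + 1 + 1) ≤ 2 ^ (d.toNat + 3) := by
            have : (2:Nat) ^ (d.toNat + 2) ≤ 2 ^ (d.toNat + 3) := Nat.pow_le_pow_right (by norm_num) (by omega)
            exact_mod_cast this
          calc (2 * d + 2 : Int) ≤ 2 ^ (d.toNat + 1 + 1) := h2p
            _ ≤ 2 ^ (d.toNat + 3) := this
    · -- both in the power branch
      rw [if_neg hbig, if_neg hbig1]
      have hq : d / 2 ≤ (d + 1) / 2 := by omega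
      have ht : (n - 2 * ((d + 1) / 2) + 1).toNat ≤ (n - 2 * (d / 2) + 1).toNat := by omega
      have : (2:Nat) ^ (n - 2 * ((d + 1) / 2) + 1).toNat ≤ 2 ^ (n - 2 * (d / 2) + 1).toNat :=
        Nat.pow_le_pow_right (by norm_num) ht
      exact_mod_cast this

-- max_M is nonincreasing on [1, n]
theorem pvMono (n d e : Int) (h1 : 1 ≤ d) (hde : d ≤ e) (hen : e ≤ n) :
    pvMaxMA n e ≤ pvMaxMA n d := by
  have key : ∀ (k : Nat) (d : Int), 1 ≤ d → d + k ≤ n → pvMaxMA n (d + k) ≤ pvMaxMA n d := by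
    intro k
    induction k with
    | zero => intro d _ _; simp
    | succ k ih =>
      intro d hd hdk
      have h1' : pvMaxMA n (d + 1 + k) ≤ pvMaxMA n (d + 1) := ih (d + 1) (by omega) (by omega)
      have h2' : pvMaxMA n (d + 1) ≤ pvMaxMA n d := pvMono_succ n d hd (by omega)
      have harg : d + ((k + 1 : Nat) : Int) = d + 1 + (k : Nat) := by omega
      calc pvMaxMA n (d + ((k + 1 : Nat) : Int)) = pvMaxMA n (d + 1 + (k : Nat)) := by rw [harg]
        _ ≤ pvMaxMA n d := le_trans h1' h2'
  have hk : e = d + ((e - d).toNat : Int) := by omega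
  rw [hk]
  exact key (e - d).toNat d h1 (by omega)

-- A's scan returns 1 when no d in [1, t] qualifies
theorem pvLoopA_all_fail (n M : Int) : ∀ (k : Nat) (t : Int), t ≤ k →
    (∀ d, 1 ≤ d → d ≤ t → ¬ (M ≤ pvMaxMA n d)) →
    pvLoopA n M (PySem.List.pyRange t 0 (-1)) = 1 := by
  intro k
  induction k with
  | zero =>
    intro t ht _
    rw [PySem.List.pyRange_neg_one_eq_nil (by omega)]
    rfl
  | succ k ih =>
    intro t ht hfail
    by_cases h0 : t ≤ 0
    · rw [PySem.List.pyRange_neg_one_eq_nil (by omega)]; rfl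
    · rw [PySem.List.pyRange_neg_one_cons (by omega)]
      unfold pvLoopA
      rw [if_neg (by exact fun hc => hfail t (by omega) (by omega) hc)]
      exact ih (t - 1) (by omega) (fun d hd1 hd2 => hfail d hd1 (by omega))

-- A's scan returns `best` when best qualifies and nothing in (best, t] does
theorem pvLoopA_hit (n M : Int) : ∀ (k : Nat) (t best : Int), t - best ≤ k →
    M ≤ pvMaxMA n best → 1 ≤ best → best ≤ t →
    (∀ d, best < d → d ≤ t → ¬ (M ≤ pvMaxMA n d)) →
    pvLoopA n M (PySem.List.pyRange t 0 (-1)) = best := by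
  intro k
  induction k with
  | zero =>
    intro t best hk hP h1 h2 _
    have : t = best := by omega
    subst this
    rw [PySem.List.pyRange_neg_one_cons (by omega)]
    unfold pvLoopA
    rw [if_pos hP]
  | succ k ih =>
    intro t best hk hP h1 h2 hfail
    by_cases heq : t = best
    · subst heq
      rw [PySem.List.pyRange_neg_one_cons (by omega)]
      unfold pvLoopA
      rw [if_pos hP]
    · rw [PySem.List.pyRange_neg_one_cons (by omega)]
      unfold pvLoopA
      rw [if_neg (by exact fun hc => hfail t (by omega) (by omega) hc)]
      exact ih (t - 1) best (by omega) hP h1 (by omega)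
        (fun d hd1 hd2 => hfail d hd1 (by omega))

-- The binary search computes the same value as A's descending scan
theorem pvSearch_eq (n M : Int) (hM : 2 ≤ M) : ∀ (k : Nat) (lo hi best : Int),
    (hi + 1 - lo).toNat = k → 1 ≤ lo → hi ≤ n →
    (∀ d, hi < d → d ≤ n → ¬ (M ≤ pvMaxMA n d)) →
    ((M ≤ pvMaxMA n best ∧ best = lo - 1 ∧ 1 ≤ best ∧ best ≤ n) ∨ (best = 1 ∧ lo = 1)) →
    pvSearch n M lo hi best = pvLoopA n M (PySem.List.pyRange n 0 (-1)) := by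
  intro k
  induction k using Nat.strong_induction_on with
  | _ k ih =>
    intro lo hi best hk hlo hhi hfail hinv
    by_cases h : lo ≤ hi
    · rw [pvSearch, dif_pos h]
      have hmid := PySem.Int.floordiv_two_mid_bounds h
      set mid := PySem.Int.floordiv (lo + hi) 2 with hmiddef
      by_cases hs : pvSupports n mid M = true
      · rw [if_pos hs]
        have hPmid : M ≤ pvMaxMA n mid := (pvSupports_iff n mid M hM).mp hs
        exact ih (hi + 1 - (mid + 1)).toNat (by omega) (mid + 1) hi mid rfl (by omega) hhi hfail
          (Or.inl ⟨hPmid, by omega, by omega, by omega⟩)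
      · rw [if_neg hs]
        have hnPmid : ¬ (M ≤ pvMaxMA n mid) := fun hc => hs ((pvSupports_iff n mid M hM).mpr hc)
        refine ih (mid - 1 + 1 - lo).toNat (by omega) lo (mid - 1) best rfl hlo (by omega) ?_ hinv
        intro d hd1 hd2 hc
        by_cases hdhi : hi < d
        · exact hfail d hdhi hd2 hc
        · exact hnPmid (le_trans hc (pvMono n mid d (by omega) (by omega) (by omega)))
    · rw [pvSearch, dif_neg h]
      rcases hinv with ⟨hP, hbl, hb1, hbn⟩ | ⟨hb, hl⟩
      · exact (pvLoopA_hit n M (n - best).toNat n best (by omega) hP hb1 (by omega)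
          (fun d hd1 hd2 => hfail d (by omega) hd2)).symm
      · subst hb; subst hl
        exact (pvLoopA_all_fail n M n.toNat n (by omega)
          (fun d hd1 hd2 => hfail d (by omega) hd2)).symm

-- ===== VERDICT (by name: the statement is the Claim_ definition above) =====
theorem plotkin_bound_spec : Claim_equal_plotkin_bound := by
  intro n M _
  unfold Spec_plotkin_bound plotkin_bound plotkin_bound_alt
  by_cases hM : M ≤ 1
  · rw [if_pos hM, if_pos hM]
  · rw [if_neg hM, if_neg hM]
    exact (pvSearch_eq n M (by omega) (n + 1 - 1).toNat 1 n 1 rfl (by omega) le_rfl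
      (fun d hd1 hd2 _ => by omega) (Or.inr ⟨rfl, rfl⟩)).symm
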